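-- pv_equiv track=rewrite | github.com/bssrdf/pyleet | NumberOfWaysOfCuttingAPizza.py | waysAC
-- ===== SOURCE A (Python) =====
-- from functools import lru_cache
--
-- def waysAC(pizza, K):
--     m, n, MOD = len(pizza), len(pizza[0]), 10 ** 9 + 7
--     preSum = [[0] * (n + 1) for _ in range(m + 1)]
--     for r in range(m - 1, -1, -1):
--         for c in range(n - 1, -1, -1):
--             preSum[r][c] = preSum[r][c + 1] + preSum[r + 1][c] - preSum[r + 1][c + 1] + (pizza[r][c] == 'A')
--
--     @lru_cache(None)
--     def dp(k, r, c):
--         if preSum[r][c] == 0: return 0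
--         if k == 0: return 1
--         ans = 0
--         # cut horizontally
--         for nr in range(r + 1, m):
--             if preSum[r][c] - preSum[nr][c] > 0:
--                 ans = (ans + dp(k - 1, nr, c)) % MOD
--         # cut vertically
--         for nc in range(c + 1, n):
--             if preSum[r][c] - preSum[r][nc] > 0:
--                 ans = (ans + dp(k - 1, r, nc)) % MOD
--         return ans
--
--     return dp(K - 1, 0, 0)
-- ===== SOURCE B (Python) =====
-- def waysAC(pizza, K):
--     m, n, MOD = len(pizza), len(pizza[0]), 10 ** 9 + 7
--     pre = [[0] * (n + 1) for _ in range(m + 1)]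
--     for r in range(m - 1, -1, -1):
--         for c in range(n - 1, -1, -1):
--             pre[r][c] = pre[r][c + 1] + pre[r + 1][c] - pre[r + 1][c + 1] + (pizza[r][c] == 'A')
--     cuts = K - 1
--     if pre[0][0] == 0 or cuts < 0 or cuts > m + n - 2:
--         return 0
--     # bottom-up: layer for 0 remaining cuts, then iterate
--     cur = [[1 if pre[r][c] > 0 else 0 for c in range(n)] for r in range(m)]
--     for _ in range(cuts):
--         nxt = [[0] * n for _ in range(m)]
--         for r in range(m):
--             for c in range(n):
--                 if pre[r][c] > 0:
--                     s = 0
--                     for nr in range(r + 1, m):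
--                         if pre[r][c] - pre[nr][c] > 0:
--                             s = (s + cur[nr][c]) % MOD
--                     for nc in range(c + 1, n):
--                         if pre[r][c] - pre[r][nc] > 0:
--                             s = (s + cur[r][nc]) % MOD
--                     nxt[r][c] = s
--         cur = nxt
--     return cur[0][0]
-- ===== Notes on version B (the rewrite author's own statement) =====
-- stated objective: alternative
-- what changed: Replaces the lru_cache memoized top-down recursion dp(k,r,c) by bottom-up layer tabulation over the same prefix-sum table (k=0 layer, then K-1 sweeps), with a closed-form short-circuit (no apples, K<=0, or more cuts than m+n-2 possible) returning 0 without building any layer.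
import Mathlib
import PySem

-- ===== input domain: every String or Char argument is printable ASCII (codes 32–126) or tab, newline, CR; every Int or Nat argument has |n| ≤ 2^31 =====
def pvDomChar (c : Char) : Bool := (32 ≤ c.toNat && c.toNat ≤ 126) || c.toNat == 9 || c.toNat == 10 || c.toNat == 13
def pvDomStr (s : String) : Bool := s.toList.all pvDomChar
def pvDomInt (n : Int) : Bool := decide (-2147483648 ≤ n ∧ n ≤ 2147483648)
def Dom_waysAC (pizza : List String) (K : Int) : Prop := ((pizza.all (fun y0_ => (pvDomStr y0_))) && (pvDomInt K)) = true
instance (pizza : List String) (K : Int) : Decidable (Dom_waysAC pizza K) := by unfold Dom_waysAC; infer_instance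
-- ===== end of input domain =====

-- B replaces A's memoized top-down recursion by bottom-up layer tabulation over the same
-- prefix-sum table, short-circuiting to 0 when no apples / K ≤ 0 / K-1 > m+n-2 (objective: alternative).

-- ===== PORT A =====
-- apple indicator pizza[r][c] == 'A'; total with defaults, exact on Pre_ (r < m, c < n ≤ row length)
def pvApple (pizza : List String) (r c : Nat) : Int :=
  if ((pizza.getD r "").toList.getD c ' ') = 'A' then 1 else 0

-- preSum row r, entries c..n, built right-to-left from the (already final) row r+1,
-- exactly the inner `for c in range(n-1,-1,-1)` loop; first argument of the match is n - c
def pvRowBuildFrom (pizza : List String) (r : Nat) (next : List Int) : Nat → Nat → List Int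
  | 0, _ => [0]
  | d+1, c =>
    let t := pvRowBuildFrom pizza r next d (c+1)
    (t.getD 0 0 + next.getD c 0 - next.getD (c+1) 0 + pvApple pizza r c) :: t

-- preSum rows r..m, built bottom-up, exactly the outer `for r in range(m-1,-1,-1)` loop;
-- first argument of the match is m - r
def pvRowsFrom (pizza : List String) (n : Nat) : Nat → Nat → List (List Int)
  | 0, _ => [List.replicate (n+1) 0]
  | d+1, r =>
    let rest := pvRowsFrom pizza n d (r+1)
    pvRowBuildFrom pizza r (rest.getD 0 []) n 0 :: rest

-- the finished (m+1) × (n+1) preSum table and its entry preSum[r][c]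
def pvTable (pizza : List String) (m n : Nat) : List (List Int) := pvRowsFrom pizza n m 0
def pvPreT (pizza : List String) (m n r c : Nat) : Int :=
  ((pvTable pizza m n).getD r []).getD c 0

-- A's memoized dp(k, r, c); memoization dropped (value-irrelevant); the fuel argument is a
-- totality device only (the wrapper below always supplies enough); the horizontal-cut loop
-- runs first (its result is the vertical-cut loop's initial accumulator)
def pvDpAF (pizza : List String) (m n : Nat) : Nat → Int → Nat → Nat → Int
  | 0, _, _, _ => 0
  | f+1, k, r, c =>
    if pvPreT pizza m n r c = 0 then 0
    else if k = 0 then 1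
    else
      (List.range' (c+1) (n - (c+1))).foldl
        (fun ans nc =>
          if pvPreT pizza m n r c - pvPreT pizza m n r nc > 0 then
            PySem.Int.mod (ans + pvDpAF pizza m n f (k-1) r nc) 1000000007
          else ans)
        ((List.range' (r+1) (m - (r+1))).foldl
          (fun ans nr =>
            if pvPreT pizza m n r c - pvPreT pizza m n nr c > 0 then
              PySem.Int.mod (ans + pvDpAF pizza m n f (k-1) nr c) 1000000007
            else ans) 0)

def pvDpA (pizza : List String) (m n : Nat) (k : Int) (r c : Nat) : Int :=
  pvDpAF pizza m n ((m - r) + (n - c) + 1) k r c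

def waysAC (pizza : List String) (K : Int) : Int :=
  pvDpA pizza pizza.length (pizza.headD "").length (K - 1) 0 0

-- ===== PORT B =====
-- one tabulation sweep: from the layer for k-1 remaining cuts to the layer for k
def pvStep (pizza : List String) (m n : Nat) (cur : List (List Int)) : List (List Int) :=
  (List.range m).map fun r => (List.range n).map fun c =>
    if pvPreT pizza m n r c > 0 then
      (List.range' (c+1) (n - (c+1))).foldl
        (fun s nc => if pvPreT pizza m n r c - pvPreT pizza m n r nc > 0 then
            PySem.Int.mod (s + (cur.getD r []).getD nc 0) 1000000007 else s)
        ((List.range' (r+1) (m - (r+1))).foldl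
          (fun s nr => if pvPreT pizza m n r c - pvPreT pizza m n nr c > 0 then
              PySem.Int.mod (s + (cur.getD nr []).getD c 0) 1000000007 else s) 0)
    else 0

def waysAC_alt (pizza : List String) (K : Int) : Int :=
  let m := pizza.length
  let n := (pizza.headD "").length
  let cuts := K - 1
  if pvPreT pizza m n 0 0 = 0 ∨ cuts < 0 ∨ cuts > (m : Int) + (n : Int) - 2 then 0
  else
    let cur0 := (List.range m).map fun r => (List.range n).map fun c =>
      if pvPreT pizza m n r c > 0 then (1 : Int) else 0
    let fin := (List.range cuts.toNat).foldl (fun cur _ => pvStep pizza m n cur) cur0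
    (fin.getD 0 []).getD 0 0

-- ===== PRECONDITION & SPEC =====
-- Pre_ excludes exactly the inputs where Python A raises IndexError: empty pizza (pizza[0])
-- and rows shorter than the first row (pizza[r][c] for c < len(pizza[0])).
def Pre_waysAC (pizza : List String) (K : Int) : Prop :=
  pizza ≠ [] ∧ ∀ s ∈ pizza, (pizza.headD "").length ≤ s.length
instance (pizza : List String) (K : Int) : Decidable (Pre_waysAC pizza K) := by
  unfold Pre_waysAC; infer_instance

def pvWitness_waysAC : List String × Int := (["A..", "AAA", "..."], 3)

def Spec_waysAC (pizza : List String) (K : Int) (out : Int) : Prop := out = waysAC_alt pizza K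
instance (pizza : List String) (K : Int) (out : Int) : Decidable (Spec_waysAC pizza K out) := by
  unfold Spec_waysAC; infer_instance

-- ===== CLAIM (what is proved, stated in full; the proofs are below) =====
def Claim_equal_waysAC : Prop := ∀ (pizza : List String) (K : Int),
  Dom_waysAC pizza K → Pre_waysAC pizza K → Spec_waysAC pizza K (waysAC pizza K)

-- ===== LEMMAS AND PROOFS =====

-- reference recursion for preSum (proof-only); first match argument is fuel
def pvPreRF (pizza : List String) (m n : Nat) : Nat → Nat → Nat → Int
  | 0, _, _ => 0
  | f+1, r, c =>
    if r < m ∧ c < n then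
      pvPreRF pizza m n f r (c+1) + pvPreRF pizza m n f (r+1) c
        - pvPreRF pizza m n f (r+1) (c+1) + pvApple pizza r c
    else 0

def pvPreR (pizza : List String) (m n r c : Nat) : Int :=
  pvPreRF pizza m n ((m - r) + (n - c)) r c

theorem pvPreRF_out (pizza : List String) (m n : Nat) (f r c : Nat)
    (h : ¬ (r < m ∧ c < n)) : pvPreRF pizza m n f r c = 0 := by
  cases f with
  | zero => rfl
  | succ f => simp only [pvPreRF, if_neg h]

theorem pvPreRF_fuel (pizza : List String) (m n : Nat) :
    ∀ f f' r c, (m - r) + (n - c) ≤ f → (m - r) + (n - c) ≤ f' →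
      pvPreRF pizza m n f r c = pvPreRF pizza m n f' r c := by
  intro f
  induction f with
  | zero =>
    intro f' r c h _
    rw [pvPreRF_out pizza m n 0 r c (by omega), pvPreRF_out pizza m n f' r c (by omega)]
  | succ f ih =>
    intro f' r c h h'
    by_cases hc : r < m ∧ c < n
    · cases f' with
      | zero => omega
      | succ f' =>
        simp only [pvPreRF, if_pos hc]
        rw [ih f' r (c+1) (by omega) (by omega), ih f' (r+1) c (by omega) (by omega),
          ih f' (r+1) (c+1) (by omega) (by omega)]
    · rw [pvPreRF_out pizza m n _ r c hc, pvPreRF_out pizza m n f' r c hc]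

theorem pvPreR_out (pizza : List String) (m n r c : Nat) (h : ¬ (r < m ∧ c < n)) :
    pvPreR pizza m n r c = 0 := pvPreRF_out pizza m n _ r c h

theorem pvPreR_eq (pizza : List String) (m n r c : Nat) (h : r < m ∧ c < n) :
    pvPreR pizza m n r c = pvPreR pizza m n r (c+1) + pvPreR pizza m n (r+1) c
      - pvPreR pizza m n (r+1) (c+1) + pvApple pizza r c := by
  unfold pvPreR
  have hm : (m - r) + (n - c) = ((m - r) + (n - (c+1))) + 1 + ((m - r) + (n - c) - ((m - r) + (n - (c+1)) + 1)) := by omega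
  rw [pvPreRF_fuel pizza m n _ (((m - r) + (n - c))) r c (by omega) (by omega)]
  have h2 : (m - r) + (n - c) = ((m - r) + (n - c) - 1) + 1 := by omega
  rw [h2]
  simp only [pvPreRF, if_pos h]
  rw [pvPreRF_fuel pizza m n _ ((m - r) + (n - (c+1))) r (c+1) (by omega) (by omega),
    pvPreRF_fuel pizza m n _ ((m - (r+1)) + (n - c)) (r+1) c (by omega) (by omega),
    pvPreRF_fuel pizza m n _ ((m - (r+1)) + (n - (c+1))) (r+1) (c+1) (by omega) (by omega)]

-- the built row holds the reference values: entry c' of the row for columns c..n is preR r (c+c')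
theorem pvRowBuildFrom_getD (pizza : List String) (m n : Nat) (r : Nat) (next : List Int)
    (hnext : ∀ c', next.getD c' 0 = pvPreR pizza m n (r+1) c') (hr : r < m) :
    ∀ d c, c + d = n → ∀ c',
      (pvRowBuildFrom pizza r next d c).getD c' 0 = pvPreR pizza m n r (c + c') := by
  intro d
  induction d with
  | zero =>
    intro c hc c'
    have h0 : (pvRowBuildFrom pizza r next 0 c).getD c' 0 = 0 := by
      cases c' <;> simp [pvRowBuildFrom]
    rw [h0, pvPreR_out pizza m n r (c + c') (by omega)]
  | succ d ih =>
    intro c hc c'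
    cases c' with
    | zero =>
      simp only [pvRowBuildFrom, List.getD_cons_zero]
      rw [ih (c+1) (by omega) 0, hnext c, hnext (c+1)]
      simp only [Nat.add_zero]
      rw [pvPreR_eq pizza m n r c ⟨hr, by omega⟩]
    | succ c' =>
      simp only [pvRowBuildFrom, List.getD_cons_succ]
      rw [ih (c+1) (by omega) c']
      have : c + 1 + c' = c + (c'+1) := by omega
      rw [this]

-- the built rows hold the reference values: row i of the rows for r..m is preR (r+i)
theorem pvRowsFrom_getD (pizza : List String) (n : Nat) :
    ∀ d r i c, ((pvRowsFrom pizza n d r).getD i []).getD c 0 = pvPreR pizza (r+d) n (r+i) c := by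
  intro d
  induction d with
  | zero =>
    intro r i c
    cases i with
    | zero =>
      simp only [pvRowsFrom, List.getD_cons_zero]
      rw [pvPreR_out pizza (r+0) n (r+0) c (by omega)]
      simp only [List.getD, List.getElem?_replicate]
      split <;> rfl
    | succ i =>
      simp only [pvRowsFrom, List.getD_cons_succ]
      rw [pvPreR_out pizza (r+0) n (r+(i+1)) c (by omega)]
      simp [List.getD]
  | succ d ih =>
    intro r i c
    cases i with
    | zero =>
      simp only [pvRowsFrom, List.getD_cons_zero]
      have hnext : ∀ c', ((pvRowsFrom pizza n d (r+1)).getD 0 []).getD c' 0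
          = pvPreR pizza (r+(d+1)) n (r+1) c' := by
        intro c'
        have := ih (r+1) 0 c'
        simpa [show r+1+d = r+(d+1) by omega] using this
      have := pvRowBuildFrom_getD pizza (r+(d+1)) n r
        ((pvRowsFrom pizza n d (r+1)).getD 0 []) hnext (by omega) n 0 (by omega) c
      simpa using this
    | succ i =>
      simp only [pvRowsFrom, List.getD_cons_succ]
      have := ih (r+1) i c
      simpa [show r+1+d = r+(d+1) by omega, show r+1+i = r+(i+1) by omega] using this

-- the table entry is the reference value
theorem pvPreT_eq (pizza : List String) (m n r c : Nat) :
    pvPreT pizza m n r c = pvPreR pizza m n r c := by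
  have := pvRowsFrom_getD pizza n m 0 r c
  simpa [pvPreT, pvTable] using this

-- sum of the apple indicators in row r, columns c..c+d-1 (proof-only)
def pvRowTailF (pizza : List String) (r : Nat) : Nat → Nat → Int
  | 0, _ => 0
  | d+1, c => pvApple pizza r c + pvRowTailF pizza r d (c+1)

theorem pvRowTailF_nonneg (pizza : List String) (r : Nat) :
    ∀ d c, 0 ≤ pvRowTailF pizza r d c := by
  intro d
  induction d with
  | zero => intro c; simp [pvRowTailF]
  | succ d ih =>
    intro c
    have h1 : 0 ≤ pvApple pizza r c := by unfold pvApple; positivity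
    have h2 := ih (c+1)
    simp only [pvRowTailF]
    omega

theorem pvPreR_row_decomp (pizza : List String) (m n : Nat) (r : Nat) (hr : r < m) :
    ∀ d c, n - c = d →
      pvPreR pizza m n r c = pvPreR pizza m n (r+1) c + pvRowTailF pizza r d c := by
  intro d
  induction d with
  | zero =>
    intro c hc
    rw [pvPreR_out pizza m n r c (by omega), pvPreR_out pizza m n (r+1) c (by omega)]
    simp [pvRowTailF]
  | succ d ih =>
    intro c hc
    rw [pvPreR_eq pizza m n r c ⟨hr, by omega⟩, ih (c+1) (by omega)]
    simp only [pvRowTailF]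
    ring

theorem pvPreR_nonneg (pizza : List String) (m n : Nat) :
    ∀ d r, m - r = d → ∀ c, 0 ≤ pvPreR pizza m n r c := by
  intro d
  induction d with
  | zero =>
    intro r hd c
    rw [pvPreR_out pizza m n r c (by omega)]
  | succ d ih =>
    intro r hd c
    rw [pvPreR_row_decomp pizza m n r (by omega) (n - c) c rfl]
    have h1 := ih (r+1) (by omega) c
    have h2 := pvRowTailF_nonneg pizza r (n - c) c
    omega

theorem pvPreT_nonneg (pizza : List String) (m n r c : Nat) : 0 ≤ pvPreT pizza m n r c := by
  rw [pvPreT_eq]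
  exact pvPreR_nonneg pizza m n (m - r) r rfl c

theorem pvPreT_out (pizza : List String) (m n r c : Nat) (h : ¬ (r < m ∧ c < n)) :
    pvPreT pizza m n r c = 0 := by
  rw [pvPreT_eq]
  exact pvPreR_out pizza m n r c h

-- the accumulator stays 0 through a cut loop when every added dp-value is 0
theorem pvFoldl_zero {α : Type} (l : List α) (p : α → Prop) [DecidablePred p] (g : α → Int)
    (h : ∀ x ∈ l, g x = 0) :
    l.foldl (fun ans x => if p x then PySem.Int.mod (ans + g x) 1000000007 else ans) 0 = 0 := by
  induction l with
  | nil => rfl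
  | cons x xs ih =>
    rw [List.foldl_cons]
    have hx : (if p x then PySem.Int.mod (0 + g x) 1000000007 else (0 : Int)) = 0 := by
      rw [h x List.mem_cons_self, zero_add]
      split
      · decide
      · rfl
    rw [hx]
    exact ih (fun y hy => h y (List.mem_cons_of_mem _ hy))

-- dp is 0 for negative k, whatever the fuel
theorem pvDpAF_neg (pizza : List String) (m n : Nat) :
    ∀ f k r c, k < 0 → pvDpAF pizza m n f k r c = 0 := by
  intro f
  induction f with
  | zero => intro k r c _; rfl
  | succ f ih =>
    intro k r c hk
    simp only [pvDpAF]
    split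
    · rfl
    · rw [if_neg (by omega)]
      have h1 : (List.range' (r+1) (m - (r+1))).foldl
          (fun ans nr => if pvPreT pizza m n r c - pvPreT pizza m n nr c > 0 then
            PySem.Int.mod (ans + pvDpAF pizza m n f (k-1) nr c) 1000000007 else ans) 0 = 0 :=
        pvFoldl_zero _ _ _ (fun x _ => ih (k-1) x c (by omega))
      rw [h1]
      exact pvFoldl_zero _ _ _ (fun x _ => ih (k-1) r x (by omega))

-- dp is 0 when k exceeds the number of cuts still possible from (r, c), whatever the fuel
theorem pvDpAF_big (pizza : List String) (m n : Nat) :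
    ∀ f (k : Int) r c, (((m - 1 - r) + (n - 1 - c) : Nat) : Int) < k → pvDpAF pizza m n f k r c = 0 := by
  intro f
  induction f with
  | zero => intro k r c _; rfl
  | succ f ih =>
    intro k r c hk
    simp only [pvDpAF]
    split
    · rfl
    · rw [if_neg (by omega)]
      have h1 : (List.range' (r+1) (m - (r+1))).foldl
          (fun ans nr => if pvPreT pizza m n r c - pvPreT pizza m n nr c > 0 then
            PySem.Int.mod (ans + pvDpAF pizza m n f (k-1) nr c) 1000000007 else ans) 0 = 0 := by
        apply pvFoldl_zero
        intro x hx
        have hmem := List.mem_range'_1.mp hx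
        exact ih (k-1) x c (by omega)
      rw [h1]
      apply pvFoldl_zero
      intro x hx
      have hmem := List.mem_range'_1.mp hx
      exact ih (k-1) r x (by omega)

-- the fuel is irrelevant once it exceeds (m-r)+(n-c)
theorem pvDpAF_fuel (pizza : List String) (m n : Nat) :
    ∀ f f' k r c, (m - r) + (n - c) < f → (m - r) + (n - c) < f' →
      pvDpAF pizza m n f k r c = pvDpAF pizza m n f' k r c := by
  intro f
  induction f with
  | zero => intro f' k r c h _; omega
  | succ f ih =>
    intro f' k r c h h'
    cases f' with
    | zero => omega
    | succ f' =>
      simp only [pvDpAF]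
      by_cases hz : pvPreT pizza m n r c = 0
      · rw [if_pos hz, if_pos hz]
      · rw [if_neg hz, if_neg hz]
        have hrc : r < m ∧ c < n := by
          by_contra hcon
          exact hz (pvPreT_out pizza m n r c hcon)
        obtain ⟨hrm, hcn⟩ := hrc
        by_cases hk : k = 0
        · rw [if_pos hk, if_pos hk]
        · rw [if_neg hk, if_neg hk]
          have eh : (List.range' (r+1) (m - (r+1))).foldl
              (fun ans nr => if pvPreT pizza m n r c - pvPreT pizza m n nr c > 0 then
                PySem.Int.mod (ans + pvDpAF pizza m n f (k-1) nr c) 1000000007 else ans) 0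
              = (List.range' (r+1) (m - (r+1))).foldl
              (fun ans nr => if pvPreT pizza m n r c - pvPreT pizza m n nr c > 0 then
                PySem.Int.mod (ans + pvDpAF pizza m n f' (k-1) nr c) 1000000007 else ans) 0 := by
            apply List.foldl_ext
            intro ans x hx
            have hmem := List.mem_range'_1.mp hx
            rw [ih f' (k-1) x c (by omega) (by omega)]
          rw [eh]
          apply List.foldl_ext
          intro ans x hx
          have hmem := List.mem_range'_1.mp hx
          rw [ih f' (k-1) r x (by omega) (by omega)]

-- one-step recurrence for the wrapper
theorem pvDpA_eq (pizza : List String) (m n : Nat) (k : Int) (r c : Nat) :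
    pvDpA pizza m n k r c =
      if pvPreT pizza m n r c = 0 then 0
      else if k = 0 then 1
      else
        (List.range' (c+1) (n - (c+1))).foldl
          (fun ans nc =>
            if pvPreT pizza m n r c - pvPreT pizza m n r nc > 0 then
              PySem.Int.mod (ans + pvDpA pizza m n (k-1) r nc) 1000000007
            else ans)
          ((List.range' (r+1) (m - (r+1))).foldl
            (fun ans nr =>
              if pvPreT pizza m n r c - pvPreT pizza m n nr c > 0 then
                PySem.Int.mod (ans + pvDpA pizza m n (k-1) nr c) 1000000007
              else ans) 0) := by
  rw [show pvDpA pizza m n k r c = pvDpAF pizza m n ((m - r) + (n - c) + 1) k r c from rfl]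
  simp only [pvDpAF]
  by_cases hz : pvPreT pizza m n r c = 0
  · rw [if_pos hz, if_pos hz]
  · rw [if_neg hz, if_neg hz]
    have hrc : r < m ∧ c < n := by
      by_contra hcon
      exact hz (pvPreT_out pizza m n r c hcon)
    obtain ⟨hrm, hcn⟩ := hrc
    by_cases hk : k = 0
    · rw [if_pos hk, if_pos hk]
    · rw [if_neg hk, if_neg hk]
      have eh : (List.range' (r+1) (m - (r+1))).foldl
          (fun ans nr => if pvPreT pizza m n r c - pvPreT pizza m n nr c > 0 then
            PySem.Int.mod (ans + pvDpAF pizza m n ((m - r) + (n - c)) (k-1) nr c) 1000000007 else ans) 0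
          = (List.range' (r+1) (m - (r+1))).foldl
          (fun ans nr => if pvPreT pizza m n r c - pvPreT pizza m n nr c > 0 then
            PySem.Int.mod (ans + pvDpA pizza m n (k-1) nr c) 1000000007 else ans) 0 := by
        apply List.foldl_ext
        intro ans x hx
        have hmem := List.mem_range'_1.mp hx
        rw [pvDpAF_fuel pizza m n ((m - r) + (n - c)) ((m - x) + (n - c) + 1) (k-1) x c
          (by omega) (by omega)]
        rfl
      rw [eh]
      apply List.foldl_ext
      intro ans x hx
      have hmem := List.mem_range'_1.mp hx
      rw [pvDpAF_fuel pizza m n ((m - r) + (n - c)) ((m - r) + (n - x) + 1) (k-1) r x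
        (by omega) (by omega)]
      rfl

-- the j-th tabulation layer of B
def pvTab (pizza : List String) (m n : Nat) (j : Nat) : List (List Int) :=
  (List.range j).foldl (fun cur _ => pvStep pizza m n cur)
    ((List.range m).map fun r => (List.range n).map fun c =>
      if pvPreT pizza m n r c > 0 then (1 : Int) else 0)

theorem pvTab_succ (pizza : List String) (m n j : Nat) :
    pvTab pizza m n (j+1) = pvStep pizza m n (pvTab pizza m n j) := by
  simp [pvTab, List.range_succ]

theorem pvGetD_map_range {α : Type} (f : Nat → α) (m r : Nat) (d : α) :
    (((List.range m).map f).getD r d) = if r < m then f r else d := by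
  by_cases hr : r < m
  · simp [List.getD, hr]
  · simp only [List.getD]
    rw [List.getElem?_eq_none (by simpa using hr)]
    simp [hr]

-- B's layer j holds exactly A's dp values at (j, ·, ·)
theorem pvTab_eq_dp (pizza : List String) (m n : Nat) (j : Nat) (r c : Nat) :
    (((pvTab pizza m n j).getD r []).getD c 0) = pvDpA pizza m n (j : Int) r c := by
  induction j generalizing r c with
  | zero =>
    rw [pvTab]
    simp only [List.range_zero, List.foldl_nil, Nat.cast_zero]
    rw [pvGetD_map_range]
    by_cases hr : r < m
    · rw [if_pos hr, pvGetD_map_range]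
      by_cases hc : c < n
      · rw [if_pos hc, pvDpA_eq]
        have hnn := pvPreT_nonneg pizza m n r c
        by_cases hz : pvPreT pizza m n r c = 0
        · simp [hz]
        · rw [if_pos (by omega), if_neg hz, if_pos rfl]
      · rw [if_neg hc, pvDpA_eq]
        have hz := pvPreT_out pizza m n r c (by omega)
        simp [hz]
    · rw [if_neg hr, pvDpA_eq]
      have hz := pvPreT_out pizza m n r c (by omega)
      simp [hz]
  | succ j ih =>
    rw [pvTab_succ, pvStep, pvGetD_map_range]
    by_cases hr : r < m
    · rw [if_pos hr, pvGetD_map_range]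
      by_cases hc : c < n
      · rw [if_pos hc]
        have hnn := pvPreT_nonneg pizza m n r c
        by_cases hz : pvPreT pizza m n r c = 0
        · rw [if_neg (by omega), pvDpA_eq, if_pos hz]
        · have hpos : pvPreT pizza m n r c > 0 := by omega
          have hknz : ¬ (((j + 1 : Nat) : Int) = 0) := by push_cast; omega
          rw [if_pos hpos, pvDpA_eq, if_neg hz, if_neg hknz]
          have hk1 : ((j + 1 : Nat) : Int) - 1 = (j : Int) := by push_cast; ring
          simp only [hk1]
          have eh : (List.range' (r+1) (m - (r+1))).foldl
              (fun s nr => if pvPreT pizza m n r c - pvPreT pizza m n nr c > 0 then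
                PySem.Int.mod (s + (((pvTab pizza m n j).getD nr []).getD c 0)) 1000000007 else s) 0
              = (List.range' (r+1) (m - (r+1))).foldl
              (fun ans nr => if pvPreT pizza m n r c - pvPreT pizza m n nr c > 0 then
                PySem.Int.mod (ans + pvDpA pizza m n (j : Int) nr c) 1000000007 else ans) 0 := by
            apply List.foldl_ext
            intro ans x _
            rw [ih x c]
          rw [eh]
          apply List.foldl_ext
          intro ans x _
          rw [ih r x]
      · rw [if_neg hc, pvDpA_eq]
        have hz := pvPreT_out pizza m n r c (by omega)
        simp [hz]
    · rw [if_neg hr, pvDpA_eq]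
      have hz := pvPreT_out pizza m n r c (by omega)
      simp [hz]

-- ===== VERDICT (by name: the statement is the Claim_ definition above) =====
theorem waysAC_spec : Claim_equal_waysAC := by
  unfold Claim_equal_waysAC
  intro pizza K _ _
  unfold Spec_waysAC waysAC waysAC_alt
  set m := pizza.length with hm
  set n := (pizza.headD "").length with hn
  by_cases hg : pvPreT pizza m n 0 0 = 0 ∨ K - 1 < 0 ∨ K - 1 > (m : Int) + (n : Int) - 2
  · rw [if_pos hg]
    rcases hg with hz | hneg | hbig
    · rw [pvDpA_eq, if_pos hz]
    · exact pvDpAF_neg pizza m n _ (K-1) 0 0 hneg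
    · by_cases hmn : 1 ≤ m ∧ 1 ≤ n
      · exact pvDpAF_big pizza m n _ (K-1) 0 0 (by push_cast; omega)
      · rw [pvDpA_eq, if_pos (pvPreT_out pizza m n 0 0 (by omega))]
  · rw [if_neg hg]
    push Not at hg
    obtain ⟨hz, hge, hle⟩ := hg
    have h := pvTab_eq_dp pizza m n (K-1).toNat 0 0
    rw [show (((K-1).toNat : Nat) : Int) = K - 1 by omega] at h
    exact h.symm
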